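-- pv_equiv track=rewrite | github.com/Eshwar26/glpi | GLPI-Agent/lib/GLPI/Agent/Task/Inventory/MacOS/Storages.py | _parse_system_profiler_text
-- ===== SOURCE A (Python) =====
-- from typing import Dict, Any, Optional, List, Union
--
-- def _parse_system_profiler_text(text_data: str, logger=None) -> Optional[Dict[str, Any]]:
--     """
--     Parse text output from system_profiler (fallback method).
--
--     Note: XML parsing is more reliable. This is a simplified fallback.
--
--     Args:
--         text_data: Text output from system_profiler
--         logger: Optional logger object
--
--     Returns:
--         dict or None: Parsed storage information
--     """
--     # This is a simplified text parser
--     # In practice, XML format should always be preferred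
--     lines = text_data.split('\n') if text_data else []
--
--     storages = {}
--     current_device = None
--     current_name = None
--
--     for line in lines:
--         # Basic parsing logic
--         if line and not line.startswith(' ' * 4):
--             # New top-level item
--             if ':' in line:
--                 if current_device and current_name:
--                     storages[current_name] = current_device
--                 current_name = line.split(':')[0].strip()
--                 current_device = {'_name': current_name}
--         elif current_device is not None and ':' in line:
--             # Property of current device
--             parts = line.split(':', 1)
--             if len(parts) == 2:
--                 key = parts[0].strip()
--                 value = parts[1].strip()
--                 current_device[key] = value
--
--     # Add last device
--     if current_device and current_name:
--         storages[current_name] = current_device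
--
--     return {'storages': storages} if storages else None
-- ===== SOURCE B (Python) =====
-- def _parse_system_profiler_text(text_data, logger=None):
--     lines = text_data.split('\n') if text_data else []
--
--     # Pass 1: partition the lines into device blocks (name, property lines).
--     blocks = []
--     cur = None  # currently open block: [name, [property lines]]
--     for line in lines:
--         if line and not line.startswith(' ' * 4):
--             if ':' in line:
--                 if cur is not None:
--                     blocks.append(cur)
--                 cur = [line.split(':')[0].strip(), []]
--         elif cur is not None and ':' in line:
--             cur[1].append(line)
--     if cur is not None:
--         blocks.append(cur)
--
--     # Pass 2: build a dict per named block, then index the blocks by name.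
--     storages = {}
--     for name, props in blocks:
--         if not name:
--             continue
--         device = {'_name': name}
--         for prop in props:
--             parts = prop.split(':', 1)
--             if len(parts) == 2:
--                 device[parts[0].strip()] = parts[1].strip()
--         storages[name] = device
--
--     return {'storages': storages} if storages else None
-- ===== Notes on version B (the rewrite author's own statement) =====
-- stated objective: alternative
-- what changed: A parses in one interleaved loop that builds each device dict and flushes it into storages on every new header; B first partitions the lines into (name, property-lines) blocks, then in a second pass builds each device dict and indexes the blocks by name.
import Mathlib
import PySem

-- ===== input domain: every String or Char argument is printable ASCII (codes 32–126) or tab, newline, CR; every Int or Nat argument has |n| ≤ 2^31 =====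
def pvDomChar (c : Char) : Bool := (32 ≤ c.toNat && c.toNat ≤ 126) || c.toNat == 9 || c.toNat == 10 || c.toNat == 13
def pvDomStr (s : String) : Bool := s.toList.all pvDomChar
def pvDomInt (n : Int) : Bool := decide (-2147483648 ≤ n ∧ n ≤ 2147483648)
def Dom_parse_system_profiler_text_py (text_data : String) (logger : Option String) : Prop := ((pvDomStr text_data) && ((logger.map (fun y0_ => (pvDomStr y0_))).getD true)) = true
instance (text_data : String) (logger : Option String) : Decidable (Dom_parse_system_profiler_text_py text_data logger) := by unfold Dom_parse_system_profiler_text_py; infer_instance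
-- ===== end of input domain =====

-- B replaces A's one interleaved parse-and-flush loop by a two-pass decomposition
-- (partition the lines into device blocks, then build each device dict): objective 'alternative'.

-- ===== PORT A =====
-- one fold over the lines carrying (storages, current_device, current_name), flushing on each new header
def pvAStep (s : PySem.Dict String (PySem.Dict String String) × Option (PySem.Dict String String) × Option String)
    (line : String) : PySem.Dict String (PySem.Dict String String) × Option (PySem.Dict String String) × Option String :=
  if line ≠ "" ∧ ¬ PySem.Str.startswith line "    " then
    if PySem.Str.isIn ":" line then
      let s1 :=
        match s.2.1, s.2.2 with
        | some d, some n => if d.size ≠ 0 ∧ n ≠ "" then s.1.insert n d else s.1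
        | _, _ => s.1
      let n := PySem.Str.strip (((PySem.Str.split? line ":").getD []).headD "")
      (s1, some ((PySem.Dict.empty).insert "_name" n), some n)
    else s
  else
    match s.2.1 with
    | some d =>
      if PySem.Str.isIn ":" line then
        match (PySem.Str.splitMax? line ":" 1).getD [] with
        | [k, v] => (s.1, some (d.insert (PySem.Str.strip k) (PySem.Str.strip v)), s.2.2)
        | _ => s
      else s
    | none => s

-- the trailing 'add last device' flush
def pvAFinish (s : PySem.Dict String (PySem.Dict String String) × Option (PySem.Dict String String) × Option String) :
    PySem.Dict String (PySem.Dict String String) :=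
  match s.2.1, s.2.2 with
  | some d, some n => if d.size ≠ 0 ∧ n ≠ "" then s.1.insert n d else s.1
  | _, _ => s.1

def parse_system_profiler_text_py (text_data : String) (logger : Option String) :
    Option (List (String × List (String × List (String × String)))) :=
  let lines := if text_data ≠ "" then (PySem.Str.split? text_data "\n").getD [] else []
  let storages := pvAFinish (lines.foldl pvAStep (PySem.Dict.empty, none, none))
  if storages.size ≠ 0 then some [("storages", storages.items.map (fun p => (p.1, p.2.items)))] else none

-- ===== PORT B =====
-- pass 1: partition the lines into blocks (completed blocks, currently open block)
def pvBStep (s : List (String × List String) × Option (String × List String)) (line : String) :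
    List (String × List String) × Option (String × List String) :=
  if line ≠ "" ∧ ¬ PySem.Str.startswith line "    " then
    if PySem.Str.isIn ":" line then
      (s.1 ++ s.2.toList, some (PySem.Str.strip (((PySem.Str.split? line ":").getD []).headD ""), ([] : List String)))
    else s
  else
    match s.2 with
    | some c => if PySem.Str.isIn ":" line then (s.1, some (c.1, c.2 ++ [line])) else s
    | none => s

def pvBlocks (lines : List String) : List (String × List String) :=
  let s := lines.foldl pvBStep ([], none)
  s.1 ++ s.2.toList

-- pass 2: build one device dict from a block's name and property lines
def pvDevice (n : String) (props : List String) : PySem.Dict String String :=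
  props.foldl (fun d prop =>
    match (PySem.Str.splitMax? prop ":" 1).getD [] with
    | [k, v] => d.insert (PySem.Str.strip k) (PySem.Str.strip v)
    | _ => d) ((PySem.Dict.empty).insert "_name" n)

def pvStore (st : PySem.Dict String (PySem.Dict String String)) (blocks : List (String × List String)) :
    PySem.Dict String (PySem.Dict String String) :=
  blocks.foldl (fun st b => if b.1 ≠ "" then st.insert b.1 (pvDevice b.1 b.2) else st) st

def parse_system_profiler_text_py_alt (text_data : String) (logger : Option String) :
    Option (List (String × List (String × List (String × String)))) :=
  let lines := if text_data ≠ "" then (PySem.Str.split? text_data "\n").getD [] else []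
  let storages := pvStore PySem.Dict.empty (pvBlocks lines)
  if storages.size ≠ 0 then some [("storages", storages.items.map (fun p => (p.1, p.2.items)))] else none

-- ===== PRECONDITION & SPEC =====
def Spec_parse_system_profiler_text_py (text_data : String) (logger : Option String) (out : Option (List (String × List (String × List (String × String))))) : Prop := out = parse_system_profiler_text_py_alt text_data logger
instance (text_data : String) (logger : Option String) (out : Option (List (String × List (String × List (String × String))))) : Decidable (Spec_parse_system_profiler_text_py text_data logger out) := by
  unfold Spec_parse_system_profiler_text_py
  have i4 : DecidableEq (List (String × List (String × String))) := inferInstance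
  have i5 : DecidableEq (String × List (String × List (String × String))) := @instDecidableEqProd _ _ _ i4
  have i6 : DecidableEq (List (String × List (String × List (String × String)))) := @instDecidableEqList _ i5
  exact @Option.instDecidableEq _ i6 _ _

-- ===== CLAIM (what is proved, stated in full; the proofs are below) =====
def Claim_equal_parse_system_profiler_text_py : Prop := ∀ (text_data : String) (logger : Option String), Dom_parse_system_profiler_text_py text_data logger → Spec_parse_system_profiler_text_py text_data logger (parse_system_profiler_text_py text_data logger)

-- ===== LEMMAS AND PROOFS =====

-- the device dict always holds its '_name' entry, so Python's truthiness test on it is always true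
lemma pv_device_contains (n : String) (ps : List String) : (pvDevice n ps).contains "_name" = true := by
  unfold pvDevice
  suffices h : ∀ d : PySem.Dict String String, d.contains "_name" = true →
      (ps.foldl (fun d prop =>
        match (PySem.Str.splitMax? prop ":" 1).getD [] with
        | [k, v] => d.insert (PySem.Str.strip k) (PySem.Str.strip v)
        | _ => d) d).contains "_name" = true by
    exact h _ (PySem.Dict.contains_insert_self _ _ _)
  intro d hd
  induction ps generalizing d with
  | nil => exact hd
  | cons p t ih =>
    simp only [List.foldl_cons]
    apply ih
    cases hsp : (PySem.Str.splitMax? p ":" 1).getD [] with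
    | nil => exact hd
    | cons k t' =>
      cases t' with
      | nil => exact hd
      | cons v t'' =>
        cases t'' with
        | nil => simp [PySem.Dict.contains_insert, hd]
        | cons _ _ => exact hd

lemma pv_device_size (n : String) (ps : List String) : (pvDevice n ps).size ≠ 0 := by
  have h := pv_device_contains n ps
  rw [PySem.Dict.contains_iff_mem_keys] at h
  have : (pvDevice n ps).keys ≠ [] := by intro he; rw [he] at h; exact (List.not_mem_nil h)
  simp only [PySem.Dict.keys] at this
  simp only [PySem.Dict.size, ne_eq, List.length_eq_zero_iff]
  intro he; exact this (by rw [he]; rfl)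

-- the final flush of A is exactly storing the open block
lemma pv_finish_eq (st : PySem.Dict String (PySem.Dict String String)) (cur : Option (String × List String)) :
    pvAFinish (st, cur.map (fun c => pvDevice c.1 c.2), cur.map Prod.fst) = pvStore st cur.toList := by
  cases cur with
  | none => rfl
  | some c =>
    simp only [pvAFinish, pvStore, Option.map_some, Option.toList_some, List.foldl_cons, List.foldl_nil]
    have hsz := pv_device_size c.1 c.2
    split_ifs with h1 h2 h2 <;> first | rfl | (exfalso; tauto)

-- the blocks accumulator of B's first pass only ever grows on the right
lemma pvBStep_one (bs : List (String × List String)) (cur : Option (String × List String)) (line : String) :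
    pvBStep (bs, cur) line = (bs ++ (pvBStep ([], cur) line).1, (pvBStep ([], cur) line).2) := by
  cases cur with
  | none => simp only [pvBStep]; split_ifs <;> simp
  | some c => simp only [pvBStep]; split_ifs <;> simp

lemma pvBStep_shift (lines : List String) (bs : List (String × List String)) (cur : Option (String × List String)) :
    lines.foldl pvBStep (bs, cur) =
      (bs ++ (lines.foldl pvBStep ([], cur)).1, (lines.foldl pvBStep ([], cur)).2) := by
  induction lines generalizing bs cur with
  | nil => simp
  | cons l t ih =>
    simp only [List.foldl_cons]
    rcases hP : pvBStep ([], cur) l with ⟨p1, p2⟩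
    rw [pvBStep_one bs cur l, hP]
    rw [ih (bs ++ p1) p2, ih p1 p2]
    simp [List.append_assoc]

-- storing an appended block list is storing in two stages
lemma pvStore_append (st : PySem.Dict String (PySem.Dict String String)) (b1 b2 : List (String × List String)) :
    pvStore st (b1 ++ b2) = pvStore (pvStore st b1) b2 := by
  unfold pvStore; exact List.foldl_append

-- main invariant: A's loop-then-flush equals B's partition-then-store
lemma pv_main (lines : List String) (st : PySem.Dict String (PySem.Dict String String))
    (cur : Option (String × List String)) :
    pvAFinish (lines.foldl pvAStep (st, cur.map (fun c => pvDevice c.1 c.2), cur.map Prod.fst))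
      = pvStore st ((lines.foldl pvBStep ([], cur)).1 ++ (lines.foldl pvBStep ([], cur)).2.toList) := by
  induction lines generalizing st cur with
  | nil =>
    simp only [List.foldl_nil, List.nil_append]
    exact pv_finish_eq st cur
  | cons line t ih =>
    simp only [List.foldl_cons]
    by_cases h1 : line ≠ "" ∧ ¬ PySem.Str.startswith line "    "
    · by_cases h2 : PySem.Str.isIn ":" line = true
      · -- header with ':' : flush and open a new block
        have hA : pvAStep (st, cur.map (fun c => pvDevice c.1 c.2), cur.map Prod.fst) line =
            (pvStore st cur.toList,
             some (pvDevice (PySem.Str.strip (((PySem.Str.split? line ":").getD []).headD "")) []),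
             some (PySem.Str.strip (((PySem.Str.split? line ":").getD []).headD ""))) := by
          cases cur with
          | none => simp only [pvAStep, Option.map_none]; rw [if_pos h1, if_pos h2]; rfl
          | some c =>
            simp only [pvAStep, Option.map_some]
            rw [if_pos h1, if_pos h2]
            have hsz := pv_device_size c.1 c.2
            simp only [pvStore, Option.toList_some, List.foldl_cons, List.foldl_nil]
            by_cases hn : c.1 = ""
            · rw [if_neg (by simp [hn]), if_neg (by simp [hn])]; rfl
            · rw [if_pos ⟨hsz, hn⟩, if_pos hn]; rfl
        have hB : pvBStep ([], cur) line =
            (cur.toList, some (PySem.Str.strip (((PySem.Str.split? line ":").getD []).headD ""), ([] : List String))) := by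
          cases cur with
          | none => simp only [pvBStep]; rw [if_pos h1, if_pos h2]; rfl
          | some c => simp only [pvBStep]; rw [if_pos h1, if_pos h2]; rfl
        rw [hA]
        have ih' := ih (pvStore st cur.toList)
          (some (PySem.Str.strip (((PySem.Str.split? line ":").getD []).headD ""), ([] : List String)))
        simp only [Option.map_some] at ih'
        rw [ih']
        rw [hB, pvBStep_shift t cur.toList]
        rw [List.append_assoc, pvStore_append st, pvStore_append (pvStore st cur.toList)]
      · -- header without ':' : both loops ignore the line
        have hA : pvAStep (st, cur.map (fun c => pvDevice c.1 c.2), cur.map Prod.fst) line =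
            (st, cur.map (fun c => pvDevice c.1 c.2), cur.map Prod.fst) := by
          simp only [pvAStep]; rw [if_pos h1, if_neg h2]
        have hB : pvBStep ([], cur) line = ([], cur) := by
          simp only [pvBStep]; rw [if_pos h1, if_neg h2]
        rw [hA, hB, ih]
    · -- empty or indented line
      cases cur with
      | none =>
        have hA : pvAStep (st, (none : Option (PySem.Dict String String)), (none : Option String)) line =
            (st, none, none) := by
          simp only [pvAStep]; rw [if_neg h1]
        have hB : pvBStep ([], none) line = ([], none) := by
          simp only [pvBStep]; rw [if_neg h1]
        have ih' := ih st none
        simp only [Option.map_none] at ih' ⊢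
        rw [hA, hB, ih']
      | some c =>
        by_cases h2 : PySem.Str.isIn ":" line = true
        · have hA : pvAStep (st, Option.map (fun c => pvDevice c.1 c.2) (some c), Option.map Prod.fst (some c)) line =
              (st, some (pvDevice c.1 (c.2 ++ [line])), some c.1) := by
            simp only [pvAStep, Option.map_some]
            rw [if_neg h1, if_pos h2]
            unfold pvDevice
            rw [List.foldl_append]
            simp only [List.foldl_cons, List.foldl_nil]
            cases (PySem.Str.splitMax? line ":" 1).getD [] with
            | nil => rfl
            | cons k t' =>
              cases t' with
              | nil => rfl
              | cons v t'' =>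
                cases t'' with
                | nil => rfl
                | cons _ _ => rfl
          have hB : pvBStep ([], some c) line = ([], some (c.1, c.2 ++ [line])) := by
            simp only [pvBStep]; rw [if_neg h1, if_pos h2]
          have ih' := ih st (some (c.1, c.2 ++ [line]))
          simp only [Option.map_some] at ih'
          rw [hA, hB, ih']
        · have hA : pvAStep (st, Option.map (fun c => pvDevice c.1 c.2) (some c), Option.map Prod.fst (some c)) line =
              (st, Option.map (fun c => pvDevice c.1 c.2) (some c), Option.map Prod.fst (some c)) := by
            simp only [pvAStep, Option.map_some]
            rw [if_neg h1, if_neg h2]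
          have hB : pvBStep ([], some c) line = ([], some c) := by
            simp only [pvBStep]; rw [if_neg h1, if_neg h2]
          rw [hA, hB, ih]

-- ===== VERDICT (by name: the statement is the Claim_ definition above) =====
theorem parse_system_profiler_text_py_spec : Claim_equal_parse_system_profiler_text_py := by
  intro text_data logger _
  unfold Spec_parse_system_profiler_text_py parse_system_profiler_text_py parse_system_profiler_text_py_alt pvBlocks
  have h := pv_main (if text_data ≠ "" then (PySem.Str.split? text_data "\n").getD [] else []) PySem.Dict.empty none
  simp only [Option.map_none] at h
  simp only [h]
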